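-- pv_equiv track=rewrite | github.com/AI4WA/Docs2Synth | docs2synth/rag/streamlit_app.py | _select_strategies
-- ===== SOURCE A (Python) =====
-- from typing import List
--
-- def _select_strategies(strategies: List[str]) -> tuple[List[str], List[str]]:
--     """Select and order strategies for display.
--
--     Returns:
--         Tuple of (selected_strategies, selected_labels)
--     """
--     strategy_map = {
--         "naive": "Naive RAG",
--         "enhanced": "Enhanced RAG",
--         "our_retriever": "Our Retriever RAG",
--     }
--
--     # Prefer these three strategies in order
--     preferred_strategies = ["naive", "enhanced", "our_retriever"]
--     selected_strategies = []
--     selected_labels = []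
--
--     for strategy in preferred_strategies:
--         if strategy in strategies:
--             selected_strategies.append(strategy)
--             selected_labels.append(strategy_map.get(strategy, strategy.title()))
--
--     # If we don't have all three, add any remaining strategies
--     for strategy in strategies:
--         if strategy not in selected_strategies:
--             selected_strategies.append(strategy)
--             selected_labels.append(strategy_map.get(strategy, strategy.title()))
--
--     return selected_strategies, selected_labels
-- ===== SOURCE B (Python) =====
-- from typing import List
--
-- def _select_strategies(strategies: List[str]) -> tuple[List[str], List[str]]:
--     """Bucket the deduped strategies by preference rank, then label them."""
--     strategy_map = {
--         "naive": "Naive RAG",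
--         "enhanced": "Enhanced RAG",
--         "our_retriever": "Our Retriever RAG",
--     }
--     rank = {"naive": 0, "enhanced": 1, "our_retriever": 2}
--     buckets = [[], [], [], []]
--     for s in dict.fromkeys(strategies):
--         buckets[rank.get(s, 3)].append(s)
--     ordered = [s for b in buckets for s in b]
--     labels = [strategy_map.get(s, s.title()) for s in ordered]
--     return ordered, labels
-- ===== Notes on version B (the rewrite author's own statement) =====
-- stated objective: faster
-- what changed: Replace A's two append loops with growing-list membership scans by a single bucket pass: dedup via dict.fromkeys, distribute each strategy into one of four rank buckets, concatenate the buckets, and map labels once at the end.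
import Mathlib
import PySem

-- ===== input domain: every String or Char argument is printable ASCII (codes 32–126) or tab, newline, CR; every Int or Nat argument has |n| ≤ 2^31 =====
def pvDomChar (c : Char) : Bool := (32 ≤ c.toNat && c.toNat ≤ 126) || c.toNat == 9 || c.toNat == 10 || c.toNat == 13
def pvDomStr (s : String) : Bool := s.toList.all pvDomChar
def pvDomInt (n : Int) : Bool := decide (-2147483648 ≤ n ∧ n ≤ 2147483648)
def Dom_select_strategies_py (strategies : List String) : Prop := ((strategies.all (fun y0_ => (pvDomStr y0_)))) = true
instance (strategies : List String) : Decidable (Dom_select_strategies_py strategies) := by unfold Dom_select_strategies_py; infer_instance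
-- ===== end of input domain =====

-- B replaces A's two append loops with their membership scans of the growing result by one bucket pass
-- over the deduped input (objective: faster).

-- shared helpers: str.title() (ported by hand, exact on the ASCII domain) and the label-map literal both Pythons contain
def pyTitleChars : Bool → List Char → List Char
  | _, [] => []
  | prev, c :: cs =>
    if PySem.Chars.isalpha c then
      (if prev then PySem.Chars.lowerChar c else PySem.Chars.upperChar c) :: pyTitleChars true cs
    else c :: pyTitleChars false cs

def pyTitle (s : String) : String := String.ofList (pyTitleChars false s.toList)

def pvStrategyMap : PySem.Dict String String :=
  PySem.Dict.ofList [("naive", "Naive RAG"), ("enhanced", "Enhanced RAG"), ("our_retriever", "Our Retriever RAG")]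

-- ===== PORT A =====
def select_strategies_py (strategies : List String) : List String × List String :=
  let preferred_strategies : List String := ["naive", "enhanced", "our_retriever"]
  let acc1 := preferred_strategies.foldl
    (fun (acc : List String × List String) strategy =>
      if strategies.contains strategy then
        (acc.1 ++ [strategy], acc.2 ++ [pvStrategyMap.getD strategy (pyTitle strategy)])
      else acc) ([], [])
  let acc2 := strategies.foldl
    (fun (acc : List String × List String) strategy =>
      if acc.1.contains strategy then acc
      else (acc.1 ++ [strategy], acc.2 ++ [pvStrategyMap.getD strategy (pyTitle strategy)])) acc1
  acc2

-- ===== PORT B =====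
def select_strategies_py_alt (strategies : List String) : List String × List String :=
  let rank : PySem.Dict String Int := PySem.Dict.ofList [("naive", 0), ("enhanced", 1), ("our_retriever", 2)]
  let buckets := (PySem.List.dedup strategies).foldl
    (fun (b : List (List String)) s =>
      let r := rank.getD s 3
      PySem.List.pySetD b r (PySem.List.pyGetD b r [] ++ [s]))
    [[], [], [], []]
  let ordered := buckets.flatten
  let labels := ordered.map (fun s => pvStrategyMap.getD s (pyTitle s))
  (ordered, labels)

-- ===== PRECONDITION & SPEC =====
def Spec_select_strategies_py (strategies : List String) (out : List String × List String) : Prop := out = select_strategies_py_alt strategies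
instance (strategies : List String) (out : List String × List String) : Decidable (Spec_select_strategies_py strategies out) := by unfold Spec_select_strategies_py; infer_instance

-- ===== CLAIM (what is proved, stated in full; the proofs are below) =====
def Claim_equal_select_strategies_py : Prop := ∀ (strategies : List String), Dom_select_strategies_py strategies → Spec_select_strategies_py strategies (select_strategies_py strategies)

-- ===== LEMMAS AND PROOFS =====

-- proof-only abbreviations: the label of one strategy, and its preference rank
def pvLabel (s : String) : String := pvStrategyMap.getD s (pyTitle s)

def pvRk (s : String) : Int :=
  if s = "naive" then 0 else if s = "enhanced" then 1 else if s = "our_retriever" then 2 else 3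

theorem pvRank_getD (s : String) :
    (PySem.Dict.ofList [("naive", (0:Int)), ("enhanced", 1), ("our_retriever", 2)]).getD s 3 = pvRk s := by
  have h : PySem.Dict.ofList [("naive", (0:Int)), ("enhanced", 1), ("our_retriever", 2)]
      = PySem.Dict.mk [("naive", (0:Int)), ("enhanced", 1), ("our_retriever", 2)] := by decide
  rw [h, pvRk]
  split_ifs with h1 h2 h3
  · subst h1; decide
  · subst h2; decide
  · subst h3; decide
  · have g1 : (("naive":String) == s) = false := by simp; exact fun e => h1 e.symm
    have g2 : (("enhanced":String) == s) = false := by simp; exact fun e => h2 e.symm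
    have g3 : (("our_retriever":String) == s) = false := by simp; exact fun e => h3 e.symm
    simp [PySem.Dict.getD_eq_get?_getD, PySem.Dict.get?_mk_cons, g1, g2, g3, PySem.Dict.get?]

-- dedup commutes with filter (first occurrences survive a filter unchanged)
theorem pvDedup_filter (l : List String) (p : String → Bool) :
    PySem.List.dedup (l.filter p) = (PySem.List.dedup l).filter p := by
  induction l with
  | nil => rfl
  | cons x l ih =>
    simp only [List.filter_cons, PySem.List.dedup_eq_ofList] at *
    by_cases hp : p x = true
    · simp only [hp, if_pos, PySem.Set.ofList_cons, List.filter_cons, ih, PySem.Set.discard,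
        List.filter_filter]
      congr 1
      exact List.filter_congr fun a _ => by
        rcases Bool.eq_false_or_eq_true (p a) with h | h <;> simp [h, Bool.and_comm]
    · simp only [Bool.not_eq_true] at hp
      simp only [hp, Bool.false_eq_true, if_neg, ih, PySem.Set.ofList_cons, List.filter_cons,
        PySem.Set.discard, List.filter_filter, not_false_iff]
      refine (List.filter_congr fun a _ => ?_).symm
      by_cases h : p a = true
      · have hax : ¬ a = x := fun e => by rw [e] at h; simp [h] at hp
        simp [h, hax]
      · rw [Bool.not_eq_true] at h
        simp [h]

-- one step of B's bucket loop, evaluated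
theorem pvStep_eval (b0 b1 b2 b3 : List String) (x : String) :
    PySem.List.pySetD [b0,b1,b2,b3] (pvRk x) (PySem.List.pyGetD [b0,b1,b2,b3] (pvRk x) [] ++ [x])
    = if x = "naive" then [b0++[x],b1,b2,b3] else if x = "enhanced" then [b0,b1++[x],b2,b3]
      else if x = "our_retriever" then [b0,b1,b2++[x],b3] else [b0,b1,b2,b3++[x]] := by
  unfold pvRk; split_ifs <;> rfl

-- B's bucket loop fills the four buckets with the rank-0..3 elements, in input order
theorem pvBucket_fold (l : List String) (b0 b1 b2 b3 : List String) :
    l.foldl (fun (b : List (List String)) s =>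
        let r := (PySem.Dict.ofList [("naive", (0:Int)), ("enhanced", 1), ("our_retriever", 2)]).getD s 3
        PySem.List.pySetD b r (PySem.List.pyGetD b r [] ++ [s])) [b0, b1, b2, b3]
    = [b0 ++ l.filter (fun s => pvRk s == 0), b1 ++ l.filter (fun s => pvRk s == 1),
       b2 ++ l.filter (fun s => pvRk s == 2), b3 ++ l.filter (fun s => pvRk s == 3)] := by
  induction l generalizing b0 b1 b2 b3 with
  | nil => simp
  | cons x l ih =>
    rw [List.foldl_cons]
    show List.foldl _ (PySem.List.pySetD [b0,b1,b2,b3]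
        ((PySem.Dict.ofList [("naive", (0:Int)), ("enhanced", 1), ("our_retriever", 2)]).getD x 3)
        (PySem.List.pyGetD [b0,b1,b2,b3]
          ((PySem.Dict.ofList [("naive", (0:Int)), ("enhanced", 1), ("our_retriever", 2)]).getD x 3) [] ++ [x])) l = _
    rw [pvRank_getD, pvStep_eval]
    split_ifs with e0 e1 e2
    · rw [ih]; simp [pvRk, e0, List.append_assoc]
    · rw [ih]; simp [pvRk, e1, List.append_assoc]
    · rw [ih]; simp [pvRk, e0, e1, e2, List.append_assoc]
    · rw [ih]; simp [pvRk, e0, e1, e2, List.append_assoc]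

-- A's second loop: starting from a prefix P (labels in lockstep), it appends the first
-- occurrences of the elements of l that are not in P
theorem pvLoop2 (l P : List String) :
    l.foldl (fun (acc : List String × List String) strategy =>
        if acc.1.contains strategy then acc
        else (acc.1 ++ [strategy], acc.2 ++ [pvStrategyMap.getD strategy (pyTitle strategy)]))
      (P, P.map pvLabel)
    = (P ++ PySem.List.dedup (l.filter (fun s => !(P.contains s))),
       (P ++ PySem.List.dedup (l.filter (fun s => !(P.contains s)))).map pvLabel) := by
  induction l generalizing P with
  | nil => simp
  | cons x l ih =>
    rw [List.foldl_cons]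
    by_cases hc : P.contains x = true
    · show List.foldl _ (if P.contains x = true then _ else _) l = _
      rw [if_pos hc, ih]
      have hx : x ∈ P := by simpa using hc
      simp [List.filter_cons, hx, hc]
    · show List.foldl _ (if P.contains x = true then _ else _) l = _
      rw [if_neg hc]
      rw [Bool.not_eq_true] at hc
      have hmap : P.map pvLabel ++ [pvStrategyMap.getD x (pyTitle x)] = (P ++ [x]).map pvLabel := by
        simp [pvLabel]
      show List.foldl _ (P ++ [x], P.map pvLabel ++ [pvStrategyMap.getD x (pyTitle x)]) l = _
      rw [hmap, ih]
      have hlist : (P ++ [x]) ++ PySem.List.dedup (l.filter (fun s => !((P ++ [x]).contains s)))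
          = P ++ PySem.List.dedup ((x :: l).filter (fun s => !(P.contains s))) := by
        have hp : (fun s => !((P ++ [x]).contains s)) = (fun s => (!(P.contains s)) && (s != x)) := by
          funext s
          by_cases hs : s = x
          · subst hs; simp
          · have h2 : s ∈ P ++ [x] ↔ s ∈ P := by simp [hs]
            simp [List.contains_eq_mem, h2, hs]
        rw [hp]
        have hqx : (!(P.contains x)) = true := by rw [hc]; rfl
        simp only [List.filter_cons, hqx, if_pos, PySem.List.dedup_eq_ofList, PySem.Set.ofList_cons]
        have hff : List.filter (fun s => (!P.contains s) && (s != x)) l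
            = List.filter (fun s => s != x) (List.filter (fun s => !P.contains s) l) := by
          rw [List.filter_filter]
          exact List.filter_congr fun a _ => Bool.and_comm _ _
        rw [hff, ← PySem.List.dedup_eq_ofList, ← PySem.List.dedup_eq_ofList, pvDedup_filter,
          PySem.List.dedup_eq_ofList]
        show P ++ [x] ++ (PySem.Set.ofList _).filter (fun s => s != x) = _
        rw [show ∀ (t : List String), (PySem.Set.ofList t).filter (fun s => s != x)
            = PySem.Set.discard (PySem.Set.ofList t) x from fun t => rfl]
        simp [List.append_assoc]
      rw [hlist]

-- A's first loop evaluates to the preferred strategies that occur in the input (labels in lockstep)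
theorem pvLoop1 (strategies : List String) :
    (["naive", "enhanced", "our_retriever"] : List String).foldl
      (fun (acc : List String × List String) strategy =>
        if strategies.contains strategy then
          (acc.1 ++ [strategy], acc.2 ++ [pvStrategyMap.getD strategy (pyTitle strategy)])
        else acc) ([], [])
    = ((["naive", "enhanced", "our_retriever"] : List String).filter (fun s => strategies.contains s),
       ((["naive", "enhanced", "our_retriever"] : List String).filter (fun s => strategies.contains s)).map pvLabel) := by
  by_cases c1 : "naive" ∈ strategies <;>
    by_cases c2 : "enhanced" ∈ strategies <;>
      by_cases c3 : "our_retriever" ∈ strategies <;>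
        simp [c1, c2, c3, pvLabel, List.contains_eq_mem]

-- rank-0/1/2 predicates are equality tests against the three preferred names
theorem pvRk_eq_zero (s : String) : (pvRk s == 0) = (s == "naive") := by
  unfold pvRk; split_ifs <;> simp_all
theorem pvRk_eq_one (s : String) : (pvRk s == 1) = (s == "enhanced") := by
  unfold pvRk; split_ifs <;> simp_all
theorem pvRk_eq_two (s : String) : (pvRk s == 2) = (s == "our_retriever") := by
  unfold pvRk; split_ifs <;> simp_all

-- filtering a nodup list for one element
theorem pvFilter_single (D : List String) (hD : D.Nodup) (a : String) :
    D.filter (fun s => s == a) = if a ∈ D then [a] else [] := by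
  rw [show (fun s => s == a) = (· == a) from rfl, List.filter_beq]
  by_cases h : a ∈ D
  · rw [if_pos h, List.count_eq_one_of_mem hD h, List.replicate_one]
  · rw [if_neg h, List.count_eq_zero_of_not_mem h, List.replicate_zero]

-- the two strategy lists coincide
theorem pvList_eq (strategies : List String) :
    ((["naive", "enhanced", "our_retriever"] : List String).filter (fun s => strategies.contains s))
      ++ PySem.List.dedup (strategies.filter (fun s =>
            !(((["naive", "enhanced", "our_retriever"] : List String).filter
                (fun s => strategies.contains s)).contains s)))
    = ((PySem.List.dedup strategies).filter (fun s => pvRk s == 0))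
      ++ (((PySem.List.dedup strategies).filter (fun s => pvRk s == 1))
      ++ (((PySem.List.dedup strategies).filter (fun s => pvRk s == 2))
      ++ ((PySem.List.dedup strategies).filter (fun s => pvRk s == 3)))) := by
  have hnd := PySem.List.nodup_dedup strategies
  have hmem : ∀ a : String, a ∈ PySem.List.dedup strategies ↔ a ∈ strategies :=
    fun a => PySem.List.mem_dedup _ _
  have h0 : (PySem.List.dedup strategies).filter (fun s => pvRk s == 0)
      = if "naive" ∈ strategies then ["naive"] else [] := by
    simp only [pvRk_eq_zero]
    rw [pvFilter_single _ hnd]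
    simp only [hmem]
  have h1 : (PySem.List.dedup strategies).filter (fun s => pvRk s == 1)
      = if "enhanced" ∈ strategies then ["enhanced"] else [] := by
    simp only [pvRk_eq_one]
    rw [pvFilter_single _ hnd]
    simp only [hmem]
  have h2 : (PySem.List.dedup strategies).filter (fun s => pvRk s == 2)
      = if "our_retriever" ∈ strategies then ["our_retriever"] else [] := by
    simp only [pvRk_eq_two]
    rw [pvFilter_single _ hnd]
    simp only [hmem]
  have h3 : PySem.List.dedup (strategies.filter (fun s =>
        !(((["naive", "enhanced", "our_retriever"] : List String).filter
            (fun s => strategies.contains s)).contains s)))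
      = (PySem.List.dedup strategies).filter (fun s => pvRk s == 3) := by
    rw [pvDedup_filter]
    refine List.filter_congr fun a ha => ?_
    have has : a ∈ strategies := (hmem a).mp ha
    have hca : strategies.contains a = true := by simpa [List.contains_eq_mem] using has
    by_cases e0 : a = "naive"
    · subst e0
      simp [pvRk, List.filter_cons, hca, has]
      try (split_ifs <;> simp [has])
    · by_cases e1 : a = "enhanced"
      · subst e1
        simp [pvRk, List.filter_cons, hca, has]
        try (split_ifs <;> simp [has])
      · by_cases e2 : a = "our_retriever"
        · subst e2
          simp [pvRk, List.filter_cons, hca, has]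
          try (split_ifs <;> simp [has])
        · have : ∀ b ∈ (["naive", "enhanced", "our_retriever"] : List String).filter
              (fun s => strategies.contains s), ¬ a = b := by
            intro b hb
            have : b ∈ (["naive", "enhanced", "our_retriever"] : List String) :=
              List.mem_of_mem_filter hb
            simp only [List.mem_cons, List.mem_singleton, List.not_mem_nil] at this
            rcases this with rfl | rfl | rfl | h
            · exact e0
            · exact e1
            · exact e2
            · cases h
          have hna : (((["naive", "enhanced", "our_retriever"] : List String).filter
              (fun s => strategies.contains s)).contains a) = false := by
            rw [List.contains_eq_mem]
            simp only [decide_eq_false_iff_not]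
            intro hmem'
            exact (this a hmem') rfl
          simp [pvRk, e0, e1, e2, hna]
  rw [h0, h1, h2, h3]
  by_cases c1 : "naive" ∈ strategies <;> by_cases c2 : "enhanced" ∈ strategies <;>
    by_cases c3 : "our_retriever" ∈ strategies <;>
      simp [c1, c2, c3, List.contains_eq_mem, List.filter_cons, List.append_assoc]

-- A and B agree on every input
theorem pvMain (strategies : List String) :
    select_strategies_py strategies = select_strategies_py_alt strategies := by
  unfold select_strategies_py select_strategies_py_alt
  dsimp only
  rw [pvLoop1, pvLoop2, pvBucket_fold]
  simp only [List.flatten, List.nil_append, List.append_nil]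
  have hl := pvList_eq strategies
  rw [hl]
  rw [show (fun s : String => pvStrategyMap.getD s (pyTitle s)) = pvLabel from rfl]
  simp [List.append_eq, List.append_nil]

-- ===== VERDICT (by name: the statement is the Claim_ definition above) =====
theorem select_strategies_py_spec : Claim_equal_select_strategies_py := by
  intro strategies _
  unfold Spec_select_strategies_py
  exact pvMain strategies
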